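-- pv_equiv track=rewrite | github.com/Chenchen2001/5724Proj1 | DecisionTreeGPT.py | is_same_attributes
-- ===== SOURCE A (Python) =====
-- def is_same_attributes(S):
--     for attribute in S[0].keys():
--         if attribute == 'income':  # 跳过类标签
--             continue
--         values = [record[attribute] for record in S]
--         if len(set(values)) > 1:
--             return False
--     return True
-- ===== SOURCE B (Python) =====
-- def is_same_attributes(S):
--     keys = [k for k in S[0].keys() if k != 'income']
--     signatures = {tuple(record[k] for k in keys) for record in S}
--     return len(signatures) <= 1
-- ===== Notes on version B (the rewrite author's own statement) =====
-- stated objective: simpler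
-- what changed: Instead of looping over attributes and building a value set per attribute, B loops once over records, builds a whole-record signature tuple of non-income values in S[0]'s key order, and tests that the set of signatures has at most one element.
-- outside the precondition, e.g. on is_same_attributes([{'a': '1', 'b': 'x'}, {'a': '2'}]): A returns False, B raises KeyError
import Mathlib
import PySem

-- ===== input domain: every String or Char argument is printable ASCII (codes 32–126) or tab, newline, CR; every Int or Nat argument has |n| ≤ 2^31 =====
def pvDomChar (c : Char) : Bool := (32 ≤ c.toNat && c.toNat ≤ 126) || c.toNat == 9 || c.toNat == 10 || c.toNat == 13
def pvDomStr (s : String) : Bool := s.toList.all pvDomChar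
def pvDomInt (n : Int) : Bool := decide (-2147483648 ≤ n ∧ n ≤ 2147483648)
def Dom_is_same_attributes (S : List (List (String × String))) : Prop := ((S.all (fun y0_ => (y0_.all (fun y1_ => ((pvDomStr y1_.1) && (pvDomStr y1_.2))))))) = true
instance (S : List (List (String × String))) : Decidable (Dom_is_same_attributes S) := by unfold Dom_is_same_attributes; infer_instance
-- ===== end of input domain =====

-- B replaces A's attribute-outer loop (one value-set per attribute) by a single record-outer
-- pass collecting whole-record signatures into one set; simpler, same cost.

-- record[k]: Python dict lookup (first match in the association list; none = KeyError)
def pvLook (r : List (String × String)) (k : String) : Option String :=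
  (PySem.Dict.mk r).get? k

-- ===== PORT A =====
-- the 'for attribute in S[0].keys()' loop with its early 'return False'
def pvALoop (S : List (List (String × String))) : List String → Bool
  | [] => true
  | k :: ks =>
    if k == "income" then pvALoop S ks
    else
      let values := S.map (fun r => pvLook r k)
      if (PySem.Set.ofList values).length > 1 then false
      else pvALoop S ks

def is_same_attributes (S : List (List (String × String))) : Bool :=
  match S with
  | [] => false   -- S[0] raises IndexError in Python; excluded by Pre_
  | r0 :: _ => pvALoop S (PySem.Set.ofList (r0.map Prod.fst))

-- ===== PORT B =====
-- tuple(record[k] for k in keys)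
def pvSig (ks : List String) (r : List (String × String)) : List (Option String) :=
  ks.map (fun k => pvLook r k)

def is_same_attributes_alt (S : List (List (String × String))) : Bool :=
  match S with
  | [] => false   -- S[0] raises IndexError in Python; excluded by Pre_
  | r0 :: _ =>
    let ks := (PySem.Set.ofList (r0.map Prod.fst)).filter (fun k => k != "income")
    decide ((PySem.Set.ofList (S.map (pvSig ks))).length ≤ 1)

-- ===== PRECONDITION & SPEC =====
-- Pre_ excludes empty S (IndexError) and records missing a non-income key of S[0] (KeyError).
-- It slightly narrows A's returning set: A can return False early before reaching a missing
-- key (see the cite in claim.json); B naturally raises there.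
def Pre_is_same_attributes (S : List (List (String × String))) : Prop :=
  S ≠ [] ∧ ∀ r ∈ S, ∀ k ∈ S.headI.map Prod.fst, k ≠ "income" → (pvLook r k).isSome
instance (S : List (List (String × String))) : Decidable (Pre_is_same_attributes S) := by
  unfold Pre_is_same_attributes; infer_instance

def pvWitness_is_same_attributes : (List (List (String × String))) :=
  [[("a", "1"), ("income", "y")], [("a", "1"), ("income", "n")]]

def Spec_is_same_attributes (S : List (List (String × String))) (out : Bool) : Prop := out = is_same_attributes_alt S
instance (S : List (List (String × String))) (out : Bool) : Decidable (Spec_is_same_attributes S out) := by unfold Spec_is_same_attributes; infer_instance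

-- ===== CLAIM (what is proved, stated in full; the proofs are below) =====
def Claim_equal_is_same_attributes : Prop := ∀ (S : List (List (String × String))), Dom_is_same_attributes S → Pre_is_same_attributes S → Spec_is_same_attributes S (is_same_attributes S)

-- ===== LEMMAS AND PROOFS =====

-- a Python set has at most one element iff all the listed elements are equal
theorem pv_set_len_le_one_iff {α : Type} [BEq α] [LawfulBEq α] (xs : List α) :
    (PySem.Set.ofList xs).length ≤ 1 ↔ ∀ a ∈ xs, ∀ b ∈ xs, a = b := by
  constructor
  · intro h a ha b hb
    have ha' : a ∈ PySem.Set.ofList xs := (PySem.Set.mem_ofList xs a).2 ha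
    have hb' : b ∈ PySem.Set.ofList xs := (PySem.Set.mem_ofList xs b).2 hb
    rcases hs : PySem.Set.ofList xs with _ | ⟨x, _ | ⟨y, t⟩⟩
    · rw [hs] at ha'; cases ha'
    · rw [hs] at ha' hb'
      simp only [List.mem_singleton] at ha' hb'
      rw [ha', hb']
    · rw [hs] at h; simp at h
  · intro h
    rcases hs : PySem.Set.ofList xs with _ | ⟨x, _ | ⟨y, t⟩⟩
    · simp
    · simp
    · exfalso
      have hnd := PySem.Set.nodup_ofList (xs := xs)
      rw [hs] at hnd
      have hx : x ∈ xs := (PySem.Set.mem_ofList xs x).1 (hs ▸ List.mem_cons_self)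
      have hy : y ∈ xs := (PySem.Set.mem_ofList xs y).1
        (hs ▸ List.mem_cons_of_mem _ List.mem_cons_self)
      have hxy : x = y := h x hx y hy
      exact (List.nodup_cons.1 hnd).1 (hxy ▸ List.mem_cons_self)

-- A's loop is the conjunction over the keys
theorem pvALoop_eq_all (S : List (List (String × String))) (ks : List String) :
    pvALoop S ks = ks.all (fun k => k == "income" ||
      decide ((PySem.Set.ofList (S.map (fun r => pvLook r k))).length ≤ 1)) := by
  induction ks with
  | nil => rfl
  | cons k ks ih =>
    simp only [pvALoop, List.all_cons]
    cases hk : (k == "income") with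
    | true => simp [hk, ih]
    | false =>
      simp only [hk, Bool.false_or, Bool.false_eq_true, if_false]
      by_cases hl : (PySem.Set.ofList (S.map (fun r => pvLook r k))).length > 1
      · simp [if_pos hl, Nat.not_le.2 hl]
      · simp [if_neg hl, Nat.not_lt.1 hl, ih]

-- ===== VERDICT (by name: the statement is the Claim_ definition above) =====
theorem is_same_attributes_spec : Claim_equal_is_same_attributes := by
  intro S _ _
  unfold Spec_is_same_attributes
  match S with
  | [] => rfl
  | r0 :: rest =>
    simp only [is_same_attributes, is_same_attributes_alt, pvALoop_eq_all]
    rw [Bool.eq_iff_iff]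
    simp only [List.all_eq_true, Bool.or_eq_true, beq_iff_eq, decide_eq_true_eq,
      pv_set_len_le_one_iff, List.mem_map, PySem.Set.mem_ofList]
    constructor
    · rintro h _ ⟨r, hr, rfl⟩ _ ⟨r', hr', rfl⟩
      unfold pvSig
      apply List.map_eq_map_iff.2
      intro k hk
      rcases (List.mem_filter.1 hk) with ⟨hkm, hki⟩
      have hkm' : ∃ a ∈ r0, a.1 = k := by
        simpa using (PySem.Set.mem_ofList (r0.map Prod.fst) k).1 hkm
      rcases h k hkm' with hinc | hall
      · exact absurd hinc (by simpa using hki)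
      · exact hall _ ⟨r, hr, rfl⟩ _ ⟨r', hr', rfl⟩
    · intro h k hkm
      by_cases hki : k = "income"
      · exact Or.inl hki
      · refine Or.inr ?_
        rintro _ ⟨r, hr, rfl⟩ _ ⟨r', hr', rfl⟩
        have hsig := h _ ⟨r, hr, rfl⟩ _ ⟨r', hr', rfl⟩
        unfold pvSig at hsig
        exact List.map_eq_map_iff.1 hsig k (List.mem_filter.2
          ⟨(PySem.Set.mem_ofList (r0.map Prod.fst) k).2 (by simpa using hkm),
           bne_iff_ne.2 hki⟩)
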